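-- pv_equiv track=rewrite | github.com/ElAwbery/Python-Practice | Exhaustive enumeration practice/Relative_primes_1i.py | primePairs
-- ===== SOURCE A (Python) =====
-- def primePairs (n):
--
--     low = 2
--     relPrimeList = []
--
--     while low < n:
--         for a in range (low, n+1):
--             if relPrime (n, a):
--                 pair = (a, n)               # make a pair
--                 relPrimeList.append (pair)  # add pair to rel prime list
--         n -= 1
--     return relPrimeList
--
-- def relPrime (a, b):
--     """
--     takes two integers a and b, a is always larger than b
--     returns true if a and b are relative primes
--     (that is, if their greatest common denominator == 1)
--     """
--     if a%b == 1:
--         return True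
--     elif a%b == 0:
--         return False
--     else:
--         r = a%b
--         a = b
--         b = r
--         relPrime (a, b)
-- ===== SOURCE B (Python) =====
-- def primePairs(n):
--     # For each m from n down to 3, the a with m % a == 1 are exactly the divisors
--     # of m-1 that are >= 2: enumerate them by trial division up to sqrt(m-1),
--     # keeping the small and large cofactors in two already-ordered lists.
--     result = []
--     m = n
--     while m > 2:
--         k = m - 1
--         small = []
--         large = []
--         d = 1
--         while d * d <= k:
--             if k % d == 0:
--                 if d >= 2:
--                     small.append(d)
--                 e = k // d
--                 if e != d and e >= 2:
--                     large.append(e)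
--             d += 1
--         for a in small:
--             result.append((a, m))
--         for a in reversed(large):
--             result.append((a, m))
--         m -= 1
--     return result
-- ===== Notes on version B (the rewrite author's own statement) =====
-- stated objective: faster
-- what changed: Instead of scanning every a in [2,m] and testing m % a == 1 with a recursive helper, B enumerates for each m the divisors of m-1 by trial division up to sqrt(m-1), collecting small divisors and large cofactors in two already-ordered lists (no sort, no inner full scan).
import Mathlib
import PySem

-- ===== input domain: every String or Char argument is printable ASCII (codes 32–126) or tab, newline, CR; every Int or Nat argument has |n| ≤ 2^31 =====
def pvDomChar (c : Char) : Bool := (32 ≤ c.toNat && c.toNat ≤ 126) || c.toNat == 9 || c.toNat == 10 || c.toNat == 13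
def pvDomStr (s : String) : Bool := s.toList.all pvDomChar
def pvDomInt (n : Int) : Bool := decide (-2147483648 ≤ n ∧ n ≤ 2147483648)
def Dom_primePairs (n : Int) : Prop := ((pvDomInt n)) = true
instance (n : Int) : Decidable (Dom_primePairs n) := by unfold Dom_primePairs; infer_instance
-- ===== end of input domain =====

-- B replaces A's full scan of a ∈ [2,m] testing m % a == 1 by trial division of m-1
-- up to its square root (small divisors and large cofactors kept in two ordered lists);
-- objective: faster (asymptotically fewer remainder tests).

-- ===== PORT A =====
-- Python's relPrime: the else branch makes a pure recursive call, DISCARDS its result and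
-- falls off the end returning None (falsy).  The call is pure and (for the arguments
-- primePairs produces, 2 ≤ b ≤ a) total, so it is behaviourally a no-op and the port
-- returns none there directly.
def relPrime (a b : Int) : Option Bool :=
  if PySem.Int.mod a b == 1 then some true
  else if PySem.Int.mod a b == 0 then some false
  else none

def primePairsGo (n : Int) (acc : List (Int × Int)) : List (Int × Int) :=
  if 2 < n then
    primePairsGo (n - 1)
      ((PySem.List.pyRange 2 (n + 1) 1).foldl
        (fun acc a => if relPrime n a == some true then acc ++ [(a, n)] else acc) acc)
  else acc
termination_by (n - 2).toNat
decreasing_by omega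

def primePairs (n : Int) : List (Int × Int) := primePairsGo n []

-- ===== PORT B =====
-- d ≤ d * d over Int; cited by trialGo's decreasing_by.
theorem le_mul_self_int (d : Int) : d ≤ d * d := by
  nlinarith [mul_self_nonneg (2*d - 1)]

def trialGo (k d : Int) (small large : List Int) : List Int × List Int :=
  if h : d * d ≤ k then
    if PySem.Int.mod k d == 0 then
      let small' := if 2 ≤ d then small ++ [d] else small
      let e := PySem.Int.floordiv k d
      let large' := if e ≠ d ∧ 2 ≤ e then large ++ [e] else large
      trialGo k (d + 1) small' large'
    else trialGo k (d + 1) small large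
  else (small, large)
termination_by (k + 1 - d).toNat
decreasing_by
  · have := le_mul_self_int d; omega
  · have := le_mul_self_int d; omega

def primePairsAltGo (m : Int) (result : List (Int × Int)) : List (Int × Int) :=
  if 2 < m then
    let k := m - 1
    let sl := trialGo k 1 [] []
    let r1 := sl.1.foldl (fun acc a => acc ++ [(a, m)]) result
    let r2 := sl.2.reverse.foldl (fun acc a => acc ++ [(a, m)]) r1
    primePairsAltGo (m - 1) r2
  else result
termination_by (m - 2).toNat
decreasing_by omega

def primePairs_alt (n : Int) : List (Int × Int) := primePairsAltGo n []

-- ===== PRECONDITION & SPEC =====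
def Spec_primePairs (n : Int) (out : List (Int × Int)) : Prop := out = primePairs_alt n
instance (n : Int) (out : List (Int × Int)) : Decidable (Spec_primePairs n out) := by unfold Spec_primePairs; infer_instance

-- ===== CLAIM (what is proved, stated in full; the proofs are below) =====
def Claim_equal_primePairs : Prop := ∀ (n : Int), Dom_primePairs n → Spec_primePairs n (primePairs n)

-- ===== LEMMAS AND PROOFS =====

-- The list of a's appended for a given n by A's inner for-loop.
def innerA (n : Int) : List Int :=
  (PySem.List.pyRange 2 (n + 1) 1).filter (fun a => relPrime n a == some true)

-- What trialGo k d adds to small / large.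
def smallSpec (k d : Int) : List Int :=
  (PySem.List.pyRange d (k + 1) 1).filter (fun x => decide (x * x ≤ k ∧ x ∣ k ∧ 2 ≤ x))

def largeSpec (k d : Int) : List Int :=
  ((PySem.List.pyRange d (k + 1) 1).filter
      (fun x => decide (x * x ≤ k ∧ x ∣ k ∧ k / x ≠ x ∧ 2 ≤ k / x))).map (fun x => k / x)

def innerB (k : Int) : List Int := smallSpec k 1 ++ (largeSpec k 1).reverse

theorem innerA_eq (n : Int) : ∀ acc,
    (PySem.List.pyRange 2 (n + 1) 1).foldl
      (fun acc a => if relPrime n a == some true then acc ++ [(a, n)] else acc) acc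
    = acc ++ (innerA n).map (fun a => (a, n)) := by
  intro acc
  exact PySem.List.foldl_append_if _ _ _ _

theorem relPrime_true (x y : Int) : (relPrime x y == some true) = true ↔ PySem.Int.mod x y = 1 := by
  unfold relPrime
  split_ifs with h1 h2 <;> simp_all

theorem mem_innerA (n a : Int) (hn : 3 ≤ n) : a ∈ innerA n ↔ a ∣ (n - 1) ∧ 2 ≤ a := by
  unfold innerA
  rw [List.mem_filter, PySem.List.mem_pyRange_one, relPrime_true]
  constructor
  · rintro ⟨⟨h2, hlt⟩, hm⟩
    rw [PySem.Int.mod_eq_emod_of_pos (by omega)] at hm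
    refine ⟨⟨n / a, ?_⟩, h2⟩
    have h := Int.mul_ediv_add_emod n a
    linarith
  · rintro ⟨⟨c, hc⟩, h2⟩
    have ha : a ≤ n - 1 := Int.le_of_dvd (by omega) ⟨c, hc⟩
    refine ⟨⟨h2, by omega⟩, ?_⟩
    rw [PySem.Int.mod_eq_emod_of_pos (by omega),
      show n = 1 + a * c by linarith, Int.add_mul_emod_self_left,
      Int.emod_eq_of_lt (by norm_num) (by omega)]

theorem smallSpec_nil (k d : Int) (hd : 1 ≤ d) (h : ¬ d * d ≤ k) : smallSpec k d = [] := by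
  rw [smallSpec, List.filter_eq_nil_iff]
  intro x hx
  rw [PySem.List.mem_pyRange_one] at hx
  simp only [decide_eq_true_eq, not_and]
  intro hxx
  nlinarith [hx.1]

theorem largeSpec_nil (k d : Int) (hd : 1 ≤ d) (h : ¬ d * d ≤ k) : largeSpec k d = [] := by
  rw [largeSpec, List.map_eq_nil_iff, List.filter_eq_nil_iff]
  intro x hx
  rw [PySem.List.mem_pyRange_one] at hx
  simp only [decide_eq_true_eq, not_and]
  intro hxx
  nlinarith [hx.1]

theorem trialGo_eq (k : Int) : ∀ (t : Nat) (d : Int), (k + 1 - d).toNat ≤ t → 1 ≤ d →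
    ∀ small large, trialGo k d small large = (small ++ smallSpec k d, large ++ largeSpec k d) := by
  intro t
  induction t with
  | zero =>
    intro d ht hd small large
    have hno : ¬ d * d ≤ k := by have := le_mul_self_int d; omega
    rw [trialGo, dif_neg hno, smallSpec_nil k d hd hno, largeSpec_nil k d hd hno]
    simp
  | succ t ih =>
    intro d ht hd small large
    by_cases h : d * d ≤ k
    · have hdk : d ≤ k := le_trans (le_mul_self_int d) h
      have hcons : PySem.List.pyRange d (k + 1) = d :: PySem.List.pyRange (d + 1) (k + 1) :=
        PySem.List.pyRange_one_cons (by omega)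
      have hrec := ih (d + 1) (by omega) (by omega)
      rw [trialGo, dif_pos h]
      by_cases hdvd : d ∣ k
      · have hmod : (PySem.Int.mod k d == 0) = true := by
          simp [PySem.Int.mod_eq_zero_iff_dvd, hdvd]
        have hfd : PySem.Int.floordiv k d = k / d := PySem.Int.floordiv_eq_ediv_of_pos (by omega)
        have hs : smallSpec k d = (if 2 ≤ d then [d] else []) ++ smallSpec k (d + 1) := by
          rw [smallSpec, hcons, List.filter_cons]
          by_cases h2 : 2 ≤ d <;> simp [h, hdvd, h2, smallSpec]
        have hl : largeSpec k d
            = (if k / d ≠ d ∧ 2 ≤ k / d then [k / d] else []) ++ largeSpec k (d + 1) := by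
          rw [largeSpec, hcons, List.filter_cons]
          by_cases hc : k / d ≠ d ∧ 2 ≤ k / d
          · simp [h, hdvd, hc.1, hc.2, largeSpec]
          · have hno : ¬ (d * d ≤ k ∧ d ∣ k ∧ k / d ≠ d ∧ 2 ≤ k / d) := by tauto
            simp only [if_neg hc]
            simp [largeSpec, hno]
        simp only [hmod, if_true, hfd]
        rw [hrec, hs, hl]
        split_ifs <;> simp
      · have hmod : (PySem.Int.mod k d == 0) = false := by
          simp [PySem.Int.mod_eq_zero_iff_dvd, hdvd]
        have hs : smallSpec k d = smallSpec k (d + 1) := by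
          rw [smallSpec, hcons, List.filter_cons]
          simp [hdvd, smallSpec]
        have hl : largeSpec k d = largeSpec k (d + 1) := by
          rw [largeSpec, hcons, List.filter_cons]
          simp [hdvd, largeSpec]
        simp only [hmod, Bool.false_eq_true, if_false]
        rw [ih (d + 1) (by omega) (by omega), hs, hl]
    · have hrw : smallSpec k d = [] := smallSpec_nil k d hd h
      have hrw2 : largeSpec k d = [] := largeSpec_nil k d hd h
      rw [trialGo, dif_neg h, hrw, hrw2]
      simp

theorem mem_innerB (k x : Int) (hk : 2 ≤ k) : x ∈ innerB k ↔ x ∣ k ∧ 2 ≤ x := by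
  unfold innerB smallSpec largeSpec
  simp only [List.mem_append, List.mem_reverse, List.mem_map, List.mem_filter,
    PySem.List.mem_pyRange_one, decide_eq_true_eq]
  constructor
  · rintro (⟨⟨_, _⟩, _, hd, h2⟩ | ⟨y, ⟨⟨hy1, hy2⟩, hyy, hyd, hne, h2⟩, rfl⟩)
    · exact ⟨hd, h2⟩
    · exact ⟨⟨y, (Int.ediv_mul_cancel hyd).symm⟩, h2⟩
  · rintro ⟨hxd, h2⟩
    have hxk : x ≤ k := Int.le_of_dvd (by omega) hxd
    by_cases hxx : x * x ≤ k
    · exact Or.inl ⟨⟨by omega, by omega⟩, hxx, hxd, h2⟩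
    · right
      have hmul : k / x * x = k := Int.ediv_mul_cancel hxd
      have hy1 : 1 ≤ k / x := (Int.le_ediv_iff_mul_le (by omega)).mpr (by omega)
      have hylt : k / x < x := by nlinarith
      have hyd : k / x ∣ k := ⟨x, hmul.symm⟩
      have hq : k / (k / x) = x := by
        set q := k / x with hqdef
        rw [← hmul, Int.mul_ediv_cancel_left x (by omega)]
      refine ⟨k / x, ⟨⟨hy1, by omega⟩, by nlinarith, hyd, by omega, by omega⟩, hq⟩

theorem pairwise_innerB (k : Int) (hk : 2 ≤ k) : (innerB k).Pairwise (· < ·) := by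
  rw [innerB, List.pairwise_append]
  refine ⟨(PySem.List.pairwise_lt_pyRange_one 1 (k + 1)).filter _, ?_, ?_⟩
  · rw [List.pairwise_reverse, largeSpec, List.pairwise_map]
    refine List.Pairwise.imp_of_mem ?_ ((PySem.List.pairwise_lt_pyRange_one 1 (k + 1)).filter _)
    intro a b ha hb hab
    rw [List.mem_filter, PySem.List.mem_pyRange_one] at ha hb
    simp only [decide_eq_true_eq] at ha hb
    obtain ⟨⟨ha1, _⟩, _, had, _, _⟩ := ha
    obtain ⟨⟨hb1, _⟩, _, hbd, _, _⟩ := hb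
    have hma : k / a * a = k := Int.ediv_mul_cancel had
    have hmb : k / b * b = k := Int.ediv_mul_cancel hbd
    have hqa : 1 ≤ k / a := (Int.le_ediv_iff_mul_le (by omega)).mpr (by omega)
    nlinarith
  · intro s hs l hl
    rw [List.mem_reverse, largeSpec, List.mem_map] at hl
    obtain ⟨y, hy, rfl⟩ := hl
    rw [smallSpec] at hs
    rw [List.mem_filter, PySem.List.mem_pyRange_one] at hs hy
    simp only [decide_eq_true_eq] at hs hy
    obtain ⟨⟨hs1, _⟩, hss, _, hs2⟩ := hs
    obtain ⟨⟨hy1, _⟩, hyy, hyd, hyne, hy2⟩ := hy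
    have hm : k / y * y = k := Int.ediv_mul_cancel hyd
    by_contra hle
    rw [Int.not_lt] at hle
    have h1 : k / y * (k / y) ≤ s * s := by nlinarith
    have h2 : k / y ≤ y := by nlinarith
    have h3 : y ≤ k / y := by nlinarith
    omega

theorem pairwise_innerA (n : Int) : (innerA n).Pairwise (· < ·) :=
  (PySem.List.pairwise_lt_pyRange_one 2 (n + 1)).filter _

theorem innerA_eq_innerB (n : Int) (hn : 3 ≤ n) : innerA n = innerB (n - 1) := by
  have hk : (2 : Int) ≤ n - 1 := by omega
  have hpA := pairwise_innerA n
  have hpB := pairwise_innerB (n - 1) hk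
  refine List.Perm.eq_of_pairwise (fun a b _ _ h1 h2 => le_antisymm h1 h2)
    (hpA.imp le_of_lt) (hpB.imp le_of_lt) ?_
  rw [List.perm_ext_iff_of_nodup (hpA.imp ne_of_lt) (hpB.imp ne_of_lt)]
  intro a
  rw [mem_innerA n a hn, mem_innerB (n - 1) a hk]

theorem go_eq : ∀ (t : Nat) (n : Int), (n - 2).toNat = t →
    ∀ acc, primePairsGo n acc = primePairsAltGo n acc := by
  intro t
  induction t with
  | zero =>
    intro n h acc
    rw [primePairsGo, primePairsAltGo, if_neg (by omega), if_neg (by omega)]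
  | succ t ih =>
    intro n h acc
    have h3 : 2 < n := by omega
    rw [primePairsGo, if_pos h3, innerA_eq]
    have hB : primePairsAltGo n acc
        = primePairsAltGo (n - 1)
            (((trialGo (n - 1) 1 [] []).2.reverse).foldl (fun acc a => acc ++ [(a, n)])
              (((trialGo (n - 1) 1 [] []).1).foldl (fun acc a => acc ++ [(a, n)]) acc)) := by
      rw [primePairsAltGo, if_pos h3]
    rw [hB, trialGo_eq (n - 1) (n - 1 + 1 - 1).toNat 1 (by omega) (by omega)]
    simp only [List.nil_append]
    rw [PySem.List.foldl_append_singleton_eq_map, PySem.List.foldl_append_singleton_eq_map]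
    rw [innerA_eq_innerB n (by omega), innerB, List.map_append, ← List.append_assoc]
    exact ih (n - 1) (by omega) _

-- ===== VERDICT (by name: the statement is the Claim_ definition above) =====
theorem primePairs_spec : Claim_equal_primePairs := by
  intro n _
  unfold Spec_primePairs primePairs primePairs_alt
  exact go_eq (n - 2).toNat n rfl []
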